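-- pv_equiv track=rewrite | github.com/LetsGoNaver/Coding_test | PCCP/Prog_250136.py | solution
-- ===== SOURCE A (Python) =====
-- dx = [1,-1,0,0]
--
-- dy = [0,0,1,-1]
--
-- def solution(land):
--     depth = len(land)
--     x_len = len(land[0])
--
--     max = 0
--     for x in range(x_len):
--         visited = set()
--         for y in range(depth):
--             dfs(land,visited,x,y)
--
--         if max < len(visited):
--             max = len(visited)
--     return max
--
-- def dfs(graph,visited,x,y):
--
--     # 현재 위치가 범위를 벗어나거나 이미 방문한 경우 함수 종료
--     if x < 0 or y < 0 or x >= len(graph[0]) or y >= len(graph) or (y, x) in visited: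
--         return
--
--     if (y,x) in visited:
--         return
--
--     # 현재 위치가 1이면, 4방향 탐색
--     if graph[y][x] == 1:
--         visited.add((y, x))
--         for i in range(4):
--             nx = x + dx[i]
--             ny = y + dy[i]
--             dfs(graph,visited,nx,ny)
--     elif graph[y][x] == 0:
--         return
-- ===== SOURCE B (Python) =====
-- def solution(land):
--     rows = len(land)
--     cols = len(land[0])
--     best = 0
--     for x in range(cols):
--         seen = set()
--         stack = [(y, x) for y in range(rows - 1, -1, -1)]
--         while stack:
--             y, cx = stack.pop()
--             if (y, cx) in seen:
--                 continue
--             if 0 <= y < rows and 0 <= cx < cols and land[y][cx] == 1: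
--                 seen.add((y, cx))
--                 stack += [(y - 1, cx), (y + 1, cx), (y, cx - 1), (y, cx + 1)]
--         if len(seen) > best:
--             best = len(seen)
--     return best
-- ===== Notes on version B (the rewrite author's own statement) =====
-- stated objective: alternative
-- what changed: A's per-column flood fill uses a recursive helper dfs() with a shared visited set; B inlines it as an iterative explicit-stack flood fill (no recursion, no helper), so deep components cannot hit Python's recursion limit.
import Mathlib
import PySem

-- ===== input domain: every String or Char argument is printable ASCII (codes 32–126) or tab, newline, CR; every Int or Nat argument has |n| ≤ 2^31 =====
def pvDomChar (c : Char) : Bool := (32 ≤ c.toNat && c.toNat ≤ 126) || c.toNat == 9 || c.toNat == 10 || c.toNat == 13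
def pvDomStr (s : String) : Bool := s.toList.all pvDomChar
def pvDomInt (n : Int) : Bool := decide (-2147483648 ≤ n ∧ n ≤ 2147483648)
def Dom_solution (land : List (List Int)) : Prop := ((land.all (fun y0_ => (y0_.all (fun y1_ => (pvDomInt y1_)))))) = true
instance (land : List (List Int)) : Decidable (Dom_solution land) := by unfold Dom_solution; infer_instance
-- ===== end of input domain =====

-- B replaces A's per-column recursive DFS (helper `dfs`) by an in-line iterative
-- explicit-stack flood fill (no recursion, no helper); same complexity, return value proved equal.

-- ===== PORT A =====
-- module-level constants dx, dy
def dxA : List Int := [1, -1, 0, 0]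
def dyA : List Int := [0, 0, 1, -1]

-- graph[y][x]; exact wherever A evaluates it (0 ≤ y < len(graph), 0 ≤ x < len(graph[0]) ≤ len(graph[y]) under Pre_)
def cellAt (g : List (List Int)) (y x : Int) : Int :=
  PySem.List.pyGetD (PySem.List.pyGetD g y []) x 0

-- dfs(graph, visited, x, y): Python's unbounded recursion modelled with a fuel argument;
-- the caller passes fuel = depth*x_len+1, larger than the recursion depth Python ever reaches
-- (each nested level has strictly more visited cells, so depth ≤ number of grid cells + 1).
def dfsA (g : List (List Int)) (visited : PySem.Set (Int × Int)) (x y : Int) :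
    Nat → PySem.Set (Int × Int)
  | 0 => visited
  | f + 1 =>
    if x < 0 ∨ y < 0 ∨ x ≥ ((g.headD []).length : Int) ∨ y ≥ (g.length : Int) ∨ (y, x) ∈ visited then
      visited
    else if cellAt g y x = 1 then
      (PySem.List.pyRange 0 4 1).foldl
        (fun vis i =>
          dfsA g vis (x + PySem.List.pyGetD dxA i 0) (y + PySem.List.pyGetD dyA i 0) f)
        (PySem.Set.add visited (y, x))
    else
      -- graph[y][x] == 0, or any other value: visited unchanged
      visited

def solution (land : List (List Int)) : Int :=
  let depth := land.length
  let x_len := (land.headD []).length      -- len(land[0]); Pre_ requires land ≠ []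
  (PySem.List.pyRange 0 (x_len : Int) 1).foldl
    (fun mx x =>
      let visited :=
        (PySem.List.pyRange 0 (depth : Int) 1).foldl
          (fun vis y => dfsA land vis x y (depth * x_len + 1)) PySem.Set.empty
      if mx < PySem.Set.len visited then PySem.Set.len visited else mx)
    0

-- ===== PORT B =====
-- the grid cells (y, x), 0 ≤ y < rows, 0 ≤ x < cols: termination measure bookkeeping only
def cellsOf (rows cols : Int) : List (Int × Int) :=
  (List.range rows.toNat).flatMap (fun i => (List.range cols.toNat).map (fun j => ((i : Int), (j : Int))))

def unvisited (rows cols : Int) (s : PySem.Set (Int × Int)) : Nat :=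
  ((cellsOf rows cols).filter (fun c => !(decide (c ∈ s)))).length

theorem mem_cellsOf (rows cols y x : Int) :
    (y, x) ∈ cellsOf rows cols ↔ 0 ≤ y ∧ y < rows ∧ 0 ≤ x ∧ x < cols := by
  simp [cellsOf]
  constructor
  · rintro ⟨⟨a, ha, rfl⟩, ⟨b, hb, rfl⟩⟩
    omega
  · rintro ⟨h1, h2, h3, h4⟩
    exact ⟨⟨y.toNat, by omega, by omega⟩, ⟨x.toNat, by omega, by omega⟩⟩

theorem length_filter_lt {α : Type} (l : List α) (p q : α → Bool)
    (himp : ∀ x, q x = true → p x = true) (c : α) (hc : c ∈ l)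
    (hp : p c = true) (hq : q c = false) :
    (l.filter q).length < (l.filter p).length := by
  induction l with
  | nil => cases hc
  | cons a t ih =>
    rcases List.mem_cons.mp hc with rfl | hct
    · have hle : (t.filter q).length ≤ (t.filter p).length := by
        simpa [List.countP_eq_length_filter] using
          List.countP_mono_left (p := q) (q := p) (fun x _ hx => himp x hx)
      simp [hp, hq]; omega
    · by_cases hqa : q a = true
      · have := ih hct
        simp [hqa, himp a hqa]; omega
      · have := ih hct
        by_cases hpa : p a = true <;>
          simp [hqa, hpa] <;> omega

theorem unvisited_lt_of_add (rows cols : Int) (s : PySem.Set (Int × Int)) (c : Int × Int)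
    (hc : c ∈ cellsOf rows cols) (hn : c ∉ s) :
    unvisited rows cols (PySem.Set.add s c) < unvisited rows cols s := by
  have himp : ∀ d : Int × Int,
      (!(decide (d ∈ PySem.Set.add s c))) = true → (!(decide (d ∈ s))) = true := by
    intro d hd
    simp only [Bool.not_eq_true', decide_eq_false_iff_not, PySem.Set.mem_add] at hd ⊢
    exact fun h => hd (Or.inl h)
  exact length_filter_lt _ _ _ himp c hc (by simp [hn]) (by simp [PySem.Set.mem_add])

-- the while loop; the Python list stack pops at its END, so it is modelled with the pop
-- side at the Lean list's HEAD (the reversal is made explicit in solution_alt below)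
def loopB (land : List (List Int)) (rows cols : Int)
    (stack : List (Int × Int)) (seen : PySem.Set (Int × Int)) : PySem.Set (Int × Int) :=
  match stack with
  | [] => seen
  | (y, cx) :: rest =>
    if hm : (y, cx) ∈ seen then
      loopB land rows cols rest seen
    else if hb : 0 ≤ y ∧ y < rows ∧ 0 ≤ cx ∧ cx < cols ∧ cellAt land y cx = 1 then
      -- push order = reverse of the Python append [(y-1,cx),(y+1,cx),(y,cx-1),(y,cx+1)]
      loopB land rows cols ((y, cx + 1) :: (y, cx - 1) :: (y + 1, cx) :: (y - 1, cx) :: rest)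
        (PySem.Set.add seen (y, cx))
    else
      loopB land rows cols rest seen
termination_by (unvisited rows cols seen * 5 + stack.length)
decreasing_by
  · simp only [List.length_cons]; omega
  · have h := unvisited_lt_of_add rows cols seen (y, cx)
      ((mem_cellsOf rows cols y cx).mpr ⟨hb.1, hb.2.1, hb.2.2.1, hb.2.2.2.1⟩) hm
    simp only [List.length_cons]; omega
  · simp only [List.length_cons]; omega

def solution_alt (land : List (List Int)) : Int :=
  let rows := (land.length : Int)
  let cols := ((land.headD []).length : Int)   -- len(land[0]); Pre_ requires land ≠ []
  (PySem.List.pyRange 0 cols 1).foldl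
    (fun best x =>
      -- stack = [(y, x) for y in range(rows-1, -1, -1)], reversed: head = pop() side
      let seen :=
        loopB land rows cols
          (((PySem.List.pyRange (rows - 1) (-1) (-1)).map (fun y => (y, x))).reverse)
          PySem.Set.empty
      if PySem.Set.len seen > best then PySem.Set.len seen else best)
    0

-- ===== PRECONDITION & SPEC =====
-- Pre_ excludes exactly the inputs on which Python A raises: empty land (IndexError on
-- land[0]) and rows shorter than row 0 (IndexError in dfs, which visits every (y, x)
-- with x < len(land[0])).
def Pre_solution (land : List (List Int)) : Prop :=
  land ≠ [] ∧ ∀ row ∈ land, (land.headD []).length ≤ row.length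
instance (land : List (List Int)) : Decidable (Pre_solution land) := by
  unfold Pre_solution; infer_instance

def pvWitness_solution : List (List Int) := [[1, 0], [0, 1]]

def Spec_solution (land : List (List Int)) (out : Int) : Prop := out = solution_alt land
instance (land : List (List Int)) (out : Int) : Decidable (Spec_solution land out) := by
  unfold Spec_solution; infer_instance

-- ===== CLAIM (what is proved, stated in full; the proofs are below) =====
def Claim_equal_solution : Prop :=
  ∀ (land : List (List Int)), Dom_solution land → Pre_solution land →
    Spec_solution land (solution land)

-- ===== LEMMAS AND PROOFS =====

theorem mem_dfsA (g : List (List Int)) (f : Nat) :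
    ∀ (V : PySem.Set (Int × Int)) (x y : Int) (c : Int × Int), c ∈ V → c ∈ dfsA g V x y f := by
  induction f with
  | zero => intro V x y c hc; simpa [dfsA] using hc
  | succ f ih =>
    intro V x y c hc
    rw [dfsA]
    split
    · exact hc
    · split
      · have haux : ∀ (l : List Int) (W : PySem.Set (Int × Int)), c ∈ W →
            c ∈ l.foldl (fun vis i =>
              dfsA g vis (x + PySem.List.pyGetD dxA i 0) (y + PySem.List.pyGetD dyA i 0) f) W := by
          intro l
          induction l with
          | nil => intro W hW; simpa using hW
          | cons a t iht =>
            intro W hW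
            exact iht _ (ih W _ _ c hW)
        exact haux _ _ (by simp [PySem.Set.mem_add]; exact Or.inl hc)
      · exact hc

theorem unvisited_mono (rows cols : Int) (V W : PySem.Set (Int × Int))
    (h : ∀ c, c ∈ V → c ∈ W) : unvisited rows cols W ≤ unvisited rows cols V := by
  simp only [unvisited, ← List.countP_eq_length_filter]
  apply List.countP_mono_left
  intro x _ hx
  simp only [Bool.not_eq_true', decide_eq_false_iff_not] at hx ⊢
  intro hxV; exact hx (h x hxV)

-- A's dfs at a live cell, fuel unfolded once and the range(4)/dx/dy fold evaluated
theorem dfsA_succ_of_one (g : List (List Int)) (V : PySem.Set (Int × Int)) (x y : Int) (f : Nat)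
    (hb : ¬(x < 0 ∨ y < 0 ∨ x ≥ ((g.headD []).length : Int) ∨ y ≥ (g.length : Int) ∨ (y, x) ∈ V))
    (h1 : cellAt g y x = 1) :
    dfsA g V x y (f + 1) =
      dfsA g (dfsA g (dfsA g (dfsA g (PySem.Set.add V (y, x)) (x + 1) y f) (x - 1) y f)
        x (y + 1) f) x (y - 1) f := by
  rw [dfsA, if_neg hb, if_pos h1]
  have hr : PySem.List.pyRange 0 4 1 = [0, 1, 2, 3] := by decide
  rw [hr]
  simp only [List.foldl, dxA, dyA, PySem.List.pyGetD]
  norm_num [show Int.toNat 2 = 2 from rfl, show Int.toNat 3 = 3 from rfl]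
  simp only [← sub_eq_add_neg]

theorem dfsA_succ_skip (g : List (List Int)) (V : PySem.Set (Int × Int)) (x y : Int) (f : Nat)
    (h : (x < 0 ∨ y < 0 ∨ x ≥ ((g.headD []).length : Int) ∨ y ≥ (g.length : Int) ∨ (y, x) ∈ V)
          ∨ cellAt g y x ≠ 1) :
    dfsA g V x y (f + 1) = V := by
  rw [dfsA]
  rcases h with h | h
  · rw [if_pos h]
  · by_cases hO : x < 0 ∨ y < 0 ∨ x ≥ ((g.headD []).length : Int) ∨ y ≥ (g.length : Int) ∨
      (y, x) ∈ V
    · rw [if_pos hO]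
    · rw [if_neg hO, if_neg h]

theorem loopB_cons_mem (g : List (List Int)) (r c y x : Int)
    (rest : List (Int × Int)) (seen : PySem.Set (Int × Int)) (hm : (y, x) ∈ seen) :
    loopB g r c ((y, x) :: rest) seen = loopB g r c rest seen := by
  rw [loopB, dif_pos hm]

theorem loopB_cons_push (g : List (List Int)) (r c y x : Int)
    (rest : List (Int × Int)) (seen : PySem.Set (Int × Int)) (hm : (y, x) ∉ seen)
    (hb : 0 ≤ y ∧ y < r ∧ 0 ≤ x ∧ x < c ∧ cellAt g y x = 1) :
    loopB g r c ((y, x) :: rest) seen =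
      loopB g r c ((y, x + 1) :: (y, x - 1) :: (y + 1, x) :: (y - 1, x) :: rest)
        (PySem.Set.add seen (y, x)) := by
  rw [loopB, dif_neg hm, dif_pos hb]

theorem loopB_cons_skip (g : List (List Int)) (r c y x : Int)
    (rest : List (Int × Int)) (seen : PySem.Set (Int × Int)) (hm : (y, x) ∉ seen)
    (hb : ¬(0 ≤ y ∧ y < r ∧ 0 ≤ x ∧ x < c ∧ cellAt g y x = 1)) :
    loopB g r c ((y, x) :: rest) seen = loopB g r c rest seen := by
  rw [loopB, dif_neg hm, dif_neg hb]

theorem loopB_nil (g : List (List Int)) (r c : Int) (seen : PySem.Set (Int × Int)) :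
    loopB g r c [] seen = seen := by
  rw [loopB]

-- master bridge: emptying `cells` from the stack = folding A's dfs over them
theorem loopB_append (g : List (List Int)) :
    ∀ (n : Nat) (cells rest : List (Int × Int)) (V : PySem.Set (Int × Int)) (f : Nat),
      unvisited (g.length : Int) ((g.headD []).length : Int) V ≤ n →
      unvisited (g.length : Int) ((g.headD []).length : Int) V < f →
      loopB g (g.length : Int) ((g.headD []).length : Int) (cells ++ rest) V =
        loopB g (g.length : Int) ((g.headD []).length : Int) rest
          (cells.foldl (fun vis c => dfsA g vis c.2 c.1 f) V) := by
  intro n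
  induction n using Nat.strong_induction_on with
  | _ n ihn =>
  intro cells
  induction cells with
  | nil => intro rest V f _ _; simp
  | cons c0 cs ihc =>
    intro rest V f hn hf
    obtain ⟨y, x⟩ := c0
    obtain ⟨f, rfl⟩ : ∃ f', f = f' + 1 := ⟨f - 1, by omega⟩
    rw [List.cons_append, List.foldl_cons]
    by_cases hm : (y, x) ∈ V
    · have hd : dfsA g V x y (f + 1) = V :=
        dfsA_succ_skip _ _ _ _ _ (Or.inl (Or.inr (Or.inr (Or.inr (Or.inr hm)))))
      rw [loopB_cons_mem g _ _ _ _ _ _ hm]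
      dsimp only
      rw [hd]
      exact ihc rest V (f + 1) hn hf
    · by_cases hb : 0 ≤ y ∧ y < (g.length : Int) ∧ 0 ≤ x ∧ x < ((g.headD []).length : Int) ∧
          cellAt g y x = 1
      · have hcell : (y, x) ∈ cellsOf (g.length : Int) ((g.headD []).length : Int) :=
          (mem_cellsOf _ _ _ _).mpr ⟨hb.1, hb.2.1, hb.2.2.1, hb.2.2.2.1⟩
        have hlt := unvisited_lt_of_add _ _ V (y, x) hcell hm
        have hnb : ¬(x < 0 ∨ y < 0 ∨ x ≥ ((g.headD []).length : Int) ∨ y ≥ (g.length : Int) ∨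
            (y, x) ∈ V) := by
          push Not
          exact ⟨by omega, by omega, by omega, by omega, hm⟩
        have hD := dfsA_succ_of_one g V x y f hnb hb.2.2.2.2
        rw [loopB_cons_push g _ _ _ _ _ _ hm hb]
        have hsplit : (y, x + 1) :: (y, x - 1) :: (y + 1, x) :: (y - 1, x) :: (cs ++ rest) =
            [(y, x + 1), (y, x - 1), (y + 1, x), (y - 1, x)] ++ (cs ++ rest) := rfl
        rw [hsplit,
          ihn _ (by omega) [(y, x + 1), (y, x - 1), (y + 1, x), (y - 1, x)] (cs ++ rest)
            (PySem.Set.add V (y, x)) f (le_refl _) (by omega)]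
        have hfold : ([(y, x + 1), (y, x - 1), (y + 1, x), (y - 1, x)]).foldl
            (fun vis c => dfsA g vis c.2 c.1 f) (PySem.Set.add V (y, x)) =
            dfsA g V x y (f + 1) := by
          dsimp only [List.foldl]
          rw [hD]
        rw [hfold]
        dsimp only
        have hsub : ∀ d, d ∈ V → d ∈ dfsA g V x y (f + 1) := fun d hd => mem_dfsA g _ V x y d hd
        have hmono := unvisited_mono (g.length : Int) ((g.headD []).length : Int) V
          (dfsA g V x y (f + 1)) hsub
        exact ihc rest (dfsA g V x y (f + 1)) (f + 1) (by omega) (by omega)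
      · have hd : dfsA g V x y (f + 1) = V := by
          apply dfsA_succ_skip
          by_cases hcell : cellAt g y x = 1
          · left
            by_contra hG
            push Not at hG
            exact hb ⟨by omega, by omega, by omega, by omega, hcell⟩
          · exact Or.inr hcell
        rw [loopB_cons_skip g _ _ _ _ _ _ hm hb]
        dsimp only
        rw [hd]
        exact ihc rest V (f + 1) hn hf

theorem length_cellsOf (g : List (List Int)) :
    (cellsOf (g.length : Int) ((g.headD []).length : Int)).length =
      g.length * (g.headD []).length := by
  simp [cellsOf, List.length_flatMap]

theorem unvisited_empty_le (g : List (List Int)) :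
    unvisited (g.length : Int) ((g.headD []).length : Int) PySem.Set.empty ≤
      g.length * (g.headD []).length := by
  calc unvisited (g.length : Int) ((g.headD []).length : Int) PySem.Set.empty
      ≤ (cellsOf (g.length : Int) ((g.headD []).length : Int)).length :=
        List.length_filter_le _ _
    _ = g.length * (g.headD []).length := length_cellsOf g

theorem per_column (g : List (List Int)) (x : Int) :
    loopB g (g.length : Int) ((g.headD []).length : Int)
      (((PySem.List.pyRange ((g.length : Int) - 1) (-1) (-1)).map (fun y => (y, x))).reverse)
      PySem.Set.empty =
    (PySem.List.pyRange 0 (g.length : Int) 1).foldl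
      (fun vis y => dfsA g vis x y (g.length * (g.headD []).length + 1)) PySem.Set.empty := by
  have hstack : ((PySem.List.pyRange ((g.length : Int) - 1) (-1) (-1)).map
      (fun y => (y, x))).reverse = (PySem.List.pyRange 0 (g.length : Int) 1).map
      (fun y => (y, x)) := by
    rw [PySem.List.pyRange_neg_one_eq_reverse]
    norm_num [List.map_reverse]
  rw [hstack]
  have happ := loopB_append g (g.length * (g.headD []).length)
    ((PySem.List.pyRange 0 (g.length : Int) 1).map (fun y => (y, x))) []
    PySem.Set.empty (g.length * (g.headD []).length + 1)
    (unvisited_empty_le g) (by have := unvisited_empty_le g; omega)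
  rw [List.append_nil] at happ
  rw [happ, loopB_nil, List.foldl_map]

-- ===== VERDICT (by name: the statement is the Claim_ definition above) =====
theorem solution_spec : Claim_equal_solution := by
  intro land _ _
  unfold Spec_solution solution solution_alt
  dsimp only
  apply PySem.List.foldl_congr_mem
  intro acc x _
  rw [per_column land x]
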